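-- pv_equiv track=rewrite | github.com/jonathanyulan99/SDE-Fundamentals | ALL/Formation/question_algos/find_left_peaks.py | find
-- ===== SOURCE A (Python) =====
-- def find(arr: list[int]) -> list[int]:
--     _left_peaks = []
--
--     for idx in range(len(arr)-1, -1, -1):
--         if not _left_peaks or _left_peaks[-1] <= arr[idx]:
--             _left_peaks.append(arr[idx])
--
--     result = []
--     while _left_peaks:
--         result.append(_left_peaks.pop())
--
--     return result
-- ===== SOURCE B (Python) =====
-- def find(arr: list[int]) -> list[int]:
--     # Suffix-maximum table + forward filtering pass (no stack, no reversal).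
--     n = len(arr)
--     if n == 0:
--         return []
--     suffix_max = [0] * n
--     suffix_max[n - 1] = arr[n - 1]
--     for i in range(n - 2, -1, -1):
--         suffix_max[i] = max(arr[i], suffix_max[i + 1])
--     return [x for x, m in zip(arr, suffix_max) if x == m]
-- ===== Notes on version B (the rewrite author's own statement) =====
-- stated objective: alternative
-- what changed: Replaces A's right-to-left stack build followed by a pop-and-reverse loop with a suffix-maximum table built once and a single forward pass that keeps arr[i] iff it equals its suffix maximum.
import Mathlib
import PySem

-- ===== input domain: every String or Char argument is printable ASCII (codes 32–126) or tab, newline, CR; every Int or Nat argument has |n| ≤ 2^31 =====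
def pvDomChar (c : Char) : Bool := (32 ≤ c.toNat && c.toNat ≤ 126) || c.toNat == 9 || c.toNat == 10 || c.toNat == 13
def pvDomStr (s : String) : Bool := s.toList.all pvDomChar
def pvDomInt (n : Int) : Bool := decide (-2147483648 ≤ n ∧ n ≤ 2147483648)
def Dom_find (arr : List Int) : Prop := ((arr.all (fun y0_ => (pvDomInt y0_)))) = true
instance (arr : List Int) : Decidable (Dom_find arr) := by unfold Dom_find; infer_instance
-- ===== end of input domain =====

-- B replaces A's stack-and-pop scheme with a suffix-maximum table plus a forward filtering pass (objective: alternative).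

-- ===== PORT A =====
-- Python stack _left_peaks modelled head-as-top: _left_peaks[-1] = head, append = cons, pop = uncons.
-- 'while _left_peaks: result.append(_left_peaks.pop())' — pops top (our head) repeatedly:
def findPopLoop : List Int → List Int → List Int
  | [], res => res
  | v :: st, res => findPopLoop st (res ++ [v])

def find (arr : List Int) : List Int :=
  let stack := (PySem.List.pyRange ((arr.length : Int) - 1) (-1) (-1)).foldl
    (fun st idx =>   -- arr[idx] ported as pyGetD: idx is always in range in this loop
      if st = [] ∨ st.headI ≤ PySem.List.pyGetD arr idx 0
      then PySem.List.pyGetD arr idx 0 :: st else st) []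
  findPopLoop stack []

-- ===== PORT B =====
-- suffix_max table, built right to left (suffix_max[i] = max(arr[i], suffix_max[i+1])):
def sufMaxB : List Int → List Int
  | [] => []
  | x :: xs =>
    match sufMaxB xs with
    | [] => [x]
    | m :: ms => max x m :: m :: ms

def find_alt (arr : List Int) : List Int :=
  if arr = [] then []
  else (arr.zip (sufMaxB arr)).filterMap (fun p => if p.1 = p.2 then some p.1 else none)

-- ===== PRECONDITION & SPEC =====
def Spec_find (arr : List Int) (out : List Int) : Prop := out = find_alt arr
instance (arr : List Int) (out : List Int) : Decidable (Spec_find arr out) := by unfold Spec_find; infer_instance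

-- ===== CLAIM (what is proved, stated in full; the proofs are below) =====
def Claim_equal_find : Prop := ∀ (arr : List Int), Dom_find arr → Spec_find arr (find arr)

-- ===== LEMMAS AND PROOFS =====

-- A's stack as a structural fold over the list itself
def coreA (xs : List Int) : List Int :=
  xs.foldr (fun v st => if st = [] ∨ st.headI ≤ v then v :: st else st) []

-- B's comprehension without the empty guard
def zfB (xs : List Int) : List Int :=
  (xs.zip (sufMaxB xs)).filterMap (fun p => if p.1 = p.2 then some p.1 else none)

theorem findPopLoop_eq (st res : List Int) : findPopLoop st res = res ++ st := by
  induction st generalizing res with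
  | nil => simp [findPopLoop]
  | cons v st ih => simp [findPopLoop, ih]

theorem find_eq_coreA (arr : List Int) : find arr = coreA arr := by
  have h1 : PySem.List.pyRange ((arr.length : Int) - 1) (-1) (-1)
      = (PySem.List.pyRange 0 (arr.length : Int) 1).reverse := by
    rw [PySem.List.pyRange_neg_one_eq_reverse]; norm_num
  unfold find coreA
  rw [h1, List.foldl_reverse, findPopLoop_eq, List.nil_append]
  have h2 : ((PySem.List.pyRange 0 (arr.length : Int) 1).map
        (fun j => PySem.List.pyGetD arr j 0)).foldr
        (fun v st => if st = [] ∨ st.headI ≤ v then v :: st else st) []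
      = (PySem.List.pyRange 0 (arr.length : Int) 1).foldr
        (fun j st => if st = [] ∨ st.headI ≤ PySem.List.pyGetD arr j 0
          then PySem.List.pyGetD arr j 0 :: st else st) [] := List.foldr_map ..
  rw [← h2, PySem.List.map_pyGetD_pyRange_zero']

theorem main_invariant (xs : List Int) :
    coreA xs = zfB xs ∧ (xs ≠ [] → coreA xs ≠ [] ∧ (coreA xs).headI = (sufMaxB xs).headI) := by
  induction xs with
  | nil => simp [coreA, zfB, sufMaxB]
  | cons x xs ih =>
    obtain ⟨heq, hne⟩ := ih
    cases xs with
    | nil =>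
      constructor
      · simp [coreA, zfB, sufMaxB]
      · intro _; simp [coreA, sufMaxB]
    | cons y ys =>
      obtain ⟨hnz, hhead⟩ := hne (by simp)
      have hstep : coreA (x :: y :: ys)
          = if coreA (y :: ys) = [] ∨ (coreA (y :: ys)).headI ≤ x
            then x :: coreA (y :: ys) else coreA (y :: ys) := rfl
      obtain ⟨m, ms, hm, hsx⟩ : ∃ m ms, sufMaxB (y :: ys) = m :: ms ∧
          sufMaxB (x :: y :: ys) = max x m :: m :: ms := by
        cases hys : sufMaxB ys with
        | nil => exact ⟨y, [], by simp [sufMaxB, hys], by simp [sufMaxB, hys]⟩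
        | cons a as => exact ⟨max y a, a :: as, by simp [sufMaxB, hys], by simp [sufMaxB, hys]⟩
      have hheadm : (coreA (y :: ys)).headI = m := by rw [hhead, hm]; rfl
      have hzf : zfB (x :: y :: ys)
          = (if x = max x m then [x] else []) ++ zfB (y :: ys) := by
        simp only [zfB, hsx, hm, List.zip_cons_cons, List.filterMap_cons]
        split_ifs <;> simp
      by_cases hle : m ≤ x
      · have hxmax : x = max x m := (max_eq_left hle).symm
        have hA : coreA (x :: y :: ys) = x :: coreA (y :: ys) := by
          rw [hstep, if_pos (Or.inr (by rw [hheadm]; exact hle))]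
        refine ⟨?_, fun _ => ⟨by simp [hA], ?_⟩⟩
        · rw [hA, hzf, if_pos hxmax, heq]; rfl
        · rw [hA, hsx]; simp [← hxmax]
      · have hxmax : ¬ x = max x m := by
          intro h; exact hle (by rw [h]; exact le_max_right x m)
        have hcond : ¬ (coreA (y :: ys) = [] ∨ (coreA (y :: ys)).headI ≤ x) := by
          rintro (h1 | h2)
          · exact hnz h1
          · exact hle (hheadm ▸ h2)
        have hA : coreA (x :: y :: ys) = coreA (y :: ys) := by rw [hstep, if_neg hcond]
        refine ⟨?_, fun _ => ⟨hA ▸ hnz, ?_⟩⟩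
        · rw [hA, hzf, if_neg hxmax, heq]; rfl
        · rw [hA, hsx, hheadm]
          have : max x m = m := max_eq_right (le_of_not_ge hle)
          simp [this]

theorem find_alt_eq_zfB (arr : List Int) : find_alt arr = zfB arr := by
  unfold find_alt zfB
  split_ifs with h
  · simp [h, sufMaxB]
  · rfl

-- ===== VERDICT (by name: the statement is the Claim_ definition above) =====
theorem find_spec : Claim_equal_find := by
  intro arr _
  unfold Spec_find
  rw [find_eq_coreA, find_alt_eq_zfB]
  exact (main_invariant arr).1
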